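-- pv_equiv track=rewrite | github.com/singularguy/TimeSeriesForecasting | 论文复现/1-AdaGrad_GRU_RNN预测/OPT.py | count_valid_solutions
-- ===== SOURCE A (Python) =====
-- def count_valid_solutions(n, min_interval, max_interval, last_start, last_end):
--     dp = [0] * n
--     # 初始化第一个1的位置在min_interval+1到max_interval+1之间
--     for k in range(min_interval + 1, max_interval + 2):
--         dp[k] = 1
--     # 填充动态规划数组
--     for k in range(min_interval + 1 + 1, n):
--         for j in range(max(k - (max_interval + 1), min_interval + 1), k - (min_interval + 1) + 1):
--             if 0 <= j < n:
--                 dp[k] += dp[j]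
--     # 计算最后1在last_start到last_end之间的解的数量
--     total = sum(dp[last_start:last_end + 1])
--     return total
-- ===== SOURCE B (Python) =====
-- def count_valid_solutions(n, min_interval, max_interval, last_start, last_end):
--     # Single left-to-right pass: each dp value is a prefix-sum window difference, O(n) total.
--     dp = []
--     prefix = [0]  # prefix[i] == sum(dp[:i])
--     for k in range(n):
--         v = 1 if min_interval + 1 <= k <= max_interval + 1 else 0
--         if k >= min_interval + 2:
--             lo = max(k - max_interval - 1, min_interval + 1)
--             hi = k - min_interval
--             if lo < hi:
--                 v += prefix[hi] - prefix[lo]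
--         dp.append(v)
--         prefix.append(prefix[-1] + v)
--     return sum(dp[last_start:last_end + 1])
-- ===== Notes on version B (the rewrite author's own statement) =====
-- stated objective: alternative
-- what changed: A seeds a preallocated dp array and then, for every position, re-sums an interval-wide dp window with a nested loop; B is a single left-to-right pass that derives each dp value as a difference of entries of a running prefix-sum list and builds dp by appending, with no nested re-summation.
-- outside the precondition, e.g. on count_valid_solutions(10, -5, -3, 0, 9): A returns 12, B raises IndexError; on count_valid_solutions(3, -2, -2, 0, 2): A returns 2, B raises IndexError
import Mathlib
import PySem

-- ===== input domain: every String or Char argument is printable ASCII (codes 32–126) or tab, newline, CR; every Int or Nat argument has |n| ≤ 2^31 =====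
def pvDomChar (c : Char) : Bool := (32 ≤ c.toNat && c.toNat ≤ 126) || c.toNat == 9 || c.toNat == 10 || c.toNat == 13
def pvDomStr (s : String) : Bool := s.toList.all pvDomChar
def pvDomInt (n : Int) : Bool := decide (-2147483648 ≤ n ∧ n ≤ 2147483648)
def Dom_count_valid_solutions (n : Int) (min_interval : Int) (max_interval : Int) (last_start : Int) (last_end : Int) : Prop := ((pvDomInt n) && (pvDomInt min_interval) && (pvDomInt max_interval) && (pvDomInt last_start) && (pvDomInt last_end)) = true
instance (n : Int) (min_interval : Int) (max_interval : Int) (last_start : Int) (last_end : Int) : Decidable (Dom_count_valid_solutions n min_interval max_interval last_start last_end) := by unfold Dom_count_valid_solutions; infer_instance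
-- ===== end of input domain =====

-- B replaces A's per-position window re-summation by a single pass with a running prefix-sum list.

-- ===== PORT A =====
-- inner loop body: `if 0 <= j < n: dp[k] += dp[j]`
def cvsInnerStep (n k : Int) (dp : List Int) (j : Int) : List Int :=
  if 0 ≤ j ∧ j < n then
    PySem.List.pySetD dp k (PySem.List.pyGetD dp k 0 + PySem.List.pyGetD dp j 0)
  else dp

-- body of the outer loop: `for j in range(max(k-(max_interval+1), min_interval+1), k-(min_interval+1)+1): …`
def cvsOuterStep (n min_interval max_interval : Int) (dp : List Int) (k : Int) : List Int :=
  (PySem.List.pyRange (max (k - (max_interval + 1)) (min_interval + 1)) (k - (min_interval + 1) + 1) 1).foldl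
    (cvsInnerStep n k) dp

-- pySetD/pyGetD are the total forms of dp[k] = …  /  dp[k]; inside Pre_ every such index is in range, matching Python exactly.
def count_valid_solutions (n : Int) (min_interval : Int) (max_interval : Int) (last_start : Int) (last_end : Int) : Int :=
  (PySem.List.slice
    ((PySem.List.pyRange (min_interval + 1 + 1) n 1).foldl (cvsOuterStep n min_interval max_interval)
      ((PySem.List.pyRange (min_interval + 1) (max_interval + 2) 1).foldl
        (fun dp k => PySem.List.pySetD dp k 1)
        (List.replicate n.toNat (0 : Int))))
    (some last_start) (some (last_end + 1))).sum

-- ===== PORT B =====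
-- one step of B's single pass: compute dp[k] from the prefix-sum list, append it to dp and extend prefix
def cvsBStep (min_interval max_interval : Int) (st : List Int × List Int) (k : Int) : List Int × List Int :=
  let v0 : Int := if min_interval + 1 ≤ k ∧ k ≤ max_interval + 1 then 1 else 0
  let v : Int :=
    if min_interval + 2 ≤ k then
      let lo := max (k - max_interval - 1) (min_interval + 1)
      let hi := k - min_interval
      if lo < hi then v0 + (PySem.List.pyGetD st.2 hi 0 - PySem.List.pyGetD st.2 lo 0) else v0
    else v0
  (st.1 ++ [v], st.2 ++ [PySem.List.pyGetD st.2 (-1) 0 + v])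

def count_valid_solutions_alt (n : Int) (min_interval : Int) (max_interval : Int) (last_start : Int) (last_end : Int) : Int :=
  (PySem.List.slice
    ((PySem.List.pyRange 0 n 1).foldl (cvsBStep min_interval max_interval) ([], [(0 : Int)])).1
    (some last_start) (some (last_end + 1))).sum

-- ===== PRECONDITION & SPEC =====
-- Pre_ excludes negative min_interval (A's negative indices then wrap around to the end of dp — an accidental
-- value B's prefix-sum pass cannot produce: B raises IndexError there) and the case min_interval ≤ max_interval
-- with max_interval + 1 ≥ n, where A's first loop writes past the end of dp and raises IndexError.
def Pre_count_valid_solutions (n : Int) (min_interval : Int) (max_interval : Int) (last_start : Int) (last_end : Int) : Prop :=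
  0 ≤ min_interval ∧ (min_interval ≤ max_interval → max_interval + 1 < n)
instance (n : Int) (min_interval : Int) (max_interval : Int) (last_start : Int) (last_end : Int) : Decidable (Pre_count_valid_solutions n min_interval max_interval last_start last_end) := by unfold Pre_count_valid_solutions; infer_instance

def pvWitness_count_valid_solutions : Int × Int × Int × Int × Int := (8, 1, 3, 0, 7)

def Spec_count_valid_solutions (n : Int) (min_interval : Int) (max_interval : Int) (last_start : Int) (last_end : Int) (out : Int) : Prop := out = count_valid_solutions_alt n min_interval max_interval last_start last_end
instance (n : Int) (min_interval : Int) (max_interval : Int) (last_start : Int) (last_end : Int) (out : Int) : Decidable (Spec_count_valid_solutions n min_interval max_interval last_start last_end out) := by unfold Spec_count_valid_solutions; infer_instance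

-- ===== CLAIM (what is proved, stated in full; the proofs are below) =====
def Claim_equal_count_valid_solutions : Prop := ∀ (n : Int) (min_interval : Int) (max_interval : Int) (last_start : Int) (last_end : Int), Dom_count_valid_solutions n min_interval max_interval last_start last_end → Pre_count_valid_solutions n min_interval max_interval last_start last_end → Spec_count_valid_solutions n min_interval max_interval last_start last_end (count_valid_solutions n min_interval max_interval last_start last_end)

-- ===== LEMMAS AND PROOFS =====

-- dp value seeded by A's first loop (and B's v0): 1 on [min_interval+1, max_interval+1], else 0
def cvsInit (min_interval max_interval k : Int) : Int :=
  if min_interval + 1 ≤ k ∧ k ≤ max_interval + 1 then 1 else 0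

-- setting index i of a mapped range rewrites the function at i
lemma setD_map_range (n i v : Int) (g : Int → Int) (h0 : 0 ≤ i) (_hi : i < n) :
    PySem.List.pySetD ((PySem.List.pyRange 0 n 1).map g) i v
      = (PySem.List.pyRange 0 n 1).map (fun x => if x = i then v else g x) := by
  rw [PySem.List.pySetD_of_nonneg _ _ h0]
  apply List.ext_getElem
  · simp
  · intro k h1 h2
    simp only [List.getElem_set, List.getElem_map, PySem.List.getElem_pyRange_one]
    simp only [List.length_set, List.length_map, PySem.List.length_pyRange_one] at h1
    by_cases h : i.toNat = k
    · rw [if_pos h, if_pos (by omega)]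
    · rw [if_neg h, if_neg (by omega)]

-- A's first loop on a mapped range
lemma set_loop_rep (n : Int) :
    ∀ (t : Nat) (c d : Int) (g : Int → Int), (d - c).toNat = t → 0 ≤ c → d ≤ n →
    (PySem.List.pyRange c d 1).foldl (fun dp k => PySem.List.pySetD dp k 1) ((PySem.List.pyRange 0 n 1).map g)
      = (PySem.List.pyRange 0 n 1).map (fun x => if c ≤ x ∧ x < d then 1 else g x) := by
  intro t
  induction t with
  | zero =>
    intro c d g ht h0 hd
    rw [show PySem.List.pyRange c d 1 = [] from PySem.List.pyRange_one_eq_nil (by omega), List.foldl_nil]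
    apply List.map_congr_left
    intro x _
    rw [if_neg (by omega)]
  | succ t ih =>
    intro c d g ht h0 hd
    rw [show PySem.List.pyRange c d 1 = c :: PySem.List.pyRange (c+1) d 1 from PySem.List.pyRange_one_cons (by omega), List.foldl_cons]
    rw [setD_map_range n c 1 g h0 (by omega)]
    rw [ih (c+1) d _ (by omega) (by omega) hd]
    apply List.map_congr_left
    intro x _
    split_ifs <;> first | rfl | omega

-- A's inner loop on a mapped range: it adds the window sum to position k
lemma inner_loop_rep (n k : Int) (hk0 : 0 ≤ k) (hkn : k < n) :
    ∀ (t : Nat) (lo hi : Int) (g : Int → Int), (hi - lo).toNat = t → 0 ≤ lo → hi ≤ k →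
    (PySem.List.pyRange lo hi 1).foldl (cvsInnerStep n k) ((PySem.List.pyRange 0 n 1).map g)
      = (PySem.List.pyRange 0 n 1).map
          (fun x => if x = k then g k + ((PySem.List.pyRange lo hi 1).map g).sum else g x) := by
  intro t
  induction t with
  | zero =>
    intro lo hi g ht h0 hhi
    simp only [show PySem.List.pyRange lo hi 1 = [] from PySem.List.pyRange_one_eq_nil (by omega),
      List.foldl_nil, List.map_nil, List.sum_nil, add_zero]
    apply List.map_congr_left
    intro x _
    by_cases h : x = k
    · subst h; rw [if_pos rfl]
    · rw [if_neg h]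
  | succ t ih =>
    intro lo hi g ht h0 hhi
    have hcons : PySem.List.pyRange lo hi 1 = lo :: PySem.List.pyRange (lo+1) hi 1 :=
      PySem.List.pyRange_one_cons (by omega)
    rw [hcons, List.foldl_cons]
    have hstep : cvsInnerStep n k ((PySem.List.pyRange 0 n 1).map g) lo
        = (PySem.List.pyRange 0 n 1).map (fun x => if x = k then g k + g lo else g x) := by
      unfold cvsInnerStep
      rw [if_pos ⟨h0, by omega⟩]
      rw [PySem.List.pyGetD_map_pyRange_of_nonneg g n k 0 hk0 hkn,
          PySem.List.pyGetD_map_pyRange_of_nonneg g n lo 0 h0 (by omega),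
          setD_map_range n k _ g hk0 hkn]
    rw [hstep, ih (lo+1) hi _ (by omega) (by omega) hhi]
    apply List.map_congr_left
    intro x _
    have hsum : ((PySem.List.pyRange (lo+1) hi 1).map (fun y => if y = k then g k + g lo else g y)).sum
        = ((PySem.List.pyRange (lo+1) hi 1).map g).sum := by
      congr 1
      apply List.map_congr_left
      intro j hj
      rw [PySem.List.mem_pyRange_one] at hj
      rw [if_neg (by omega)]
    rw [hsum, List.map_cons, List.sum_cons]
    by_cases h : x = k
    · subst h; rw [if_pos rfl, if_pos rfl, if_pos rfl]; ring
    · rw [if_neg h, if_neg h, if_neg h]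

-- a window sum of list entries is a difference of prefix sums
lemma sum_range_getD (dpB : List Int) :
    ∀ (t : Nat) (lo hi : Int), (hi - lo).toNat = t → 0 ≤ lo → lo ≤ hi → hi ≤ (dpB.length : Int) →
    ((PySem.List.pyRange lo hi 1).map (fun j => PySem.List.pyGetD dpB j 0)).sum
      = (dpB.take hi.toNat).sum - (dpB.take lo.toNat).sum := by
  intro t
  induction t with
  | zero =>
    intro lo hi ht h0 hlh hhi
    rw [show PySem.List.pyRange lo hi 1 = [] from PySem.List.pyRange_one_eq_nil (by omega)]
    have : lo = hi := by omega
    simp [this]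
  | succ t ih =>
    intro lo hi ht h0 hlh hhi
    rw [show PySem.List.pyRange lo hi 1 = lo :: PySem.List.pyRange (lo+1) hi 1 from PySem.List.pyRange_one_cons (by omega), List.map_cons, List.sum_cons]
    rw [ih (lo+1) hi (by omega) (by omega) (by omega) hhi]
    rw [PySem.List.pyGetD_of_nonneg _ _ h0]
    have hlt : lo.toNat < dpB.length := by omega
    have : (dpB.take (lo.toNat+1)).sum = (dpB.take lo.toNat).sum + dpB[lo.toNat] := List.sum_take_succ _ _ hlt
    rw [List.getD_eq_getElem _ _ hlt]
    have h1 : (lo+1).toNat = lo.toNat + 1 := by omega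
    rw [h1]
    omega

lemma pyGetD_append_lt (l : List Int) (w : Int) (i : Int) (h0 : 0 ≤ i) (h : i < (l.length : Int)) :
    PySem.List.pyGetD (l ++ [w]) i 0 = PySem.List.pyGetD l i 0 := by
  rw [PySem.List.pyGetD_of_nonneg _ _ h0, PySem.List.pyGetD_of_nonneg _ _ h0]
  rw [List.getD_append]; omega

lemma pyGetD_append_last (l : List Int) (w : Int) :
    PySem.List.pyGetD (l ++ [w]) (l.length : Int) 0 = w := by
  rw [PySem.List.pyGetD_of_nonneg _ _ (by positivity)]
  simp

lemma pyGetD_last_of_len (l : List Int) (m : Int) (hm : (l.length : Int) = m + 1) (h0 : 0 ≤ m) :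
    PySem.List.pyGetD l (-1) 0 = PySem.List.pyGetD l m 0 := by
  rw [show (-1 : Int) = -OfNat.ofNat 1 by norm_num, PySem.List.pyGetD_neg_ofNat l 1 0 (by omega) (by omega)]
  rw [PySem.List.pyGetD_of_nonneg _ _ h0]
  rw [List.getD_eq_getElem _ _ (by omega)]
  congr 1; omega

-- evaluating cvsBStep when the prefix-window branch is not taken
lemma cvsBStep_lt (mi ma : Int) (st : List Int × List Int) (k : Int) (h : k < mi + 2) :
    cvsBStep mi ma st k
      = (st.1 ++ [cvsInit mi ma k], st.2 ++ [PySem.List.pyGetD st.2 (-1) 0 + cvsInit mi ma k]) := by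
  simp only [cvsBStep, cvsInit]
  rw [if_neg (by omega)]

-- evaluating cvsBStep when it is taken
lemma cvsBStep_ge (mi ma : Int) (st : List Int × List Int) (k : Int) (h : mi + 2 ≤ k) :
    cvsBStep mi ma st k
      = (st.1 ++ [(if max (k - ma - 1) (mi + 1) < k - mi then
            cvsInit mi ma k + (PySem.List.pyGetD st.2 (k - mi) 0 - PySem.List.pyGetD st.2 (max (k - ma - 1) (mi + 1)) 0)
          else cvsInit mi ma k)],
         st.2 ++ [PySem.List.pyGetD st.2 (-1) 0 + (if max (k - ma - 1) (mi + 1) < k - mi then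
            cvsInit mi ma k + (PySem.List.pyGetD st.2 (k - mi) 0 - PySem.List.pyGetD st.2 (max (k - ma - 1) (mi + 1)) 0)
          else cvsInit mi ma k)]) := by
  simp only [cvsBStep, cvsInit]
  rw [if_pos h]

-- B's first phase (k < min_interval+2): dp collects cvsInit values, prefix their partial sums
lemma cvs_base (n mi ma : Int) :
    ∀ (t : Nat) (m : Int) (dpB prefB : List Int),
    (min (mi + 2) n - m).toNat = t → 0 ≤ m → m ≤ min (mi + 2) n →
    (dpB.length : Int) = m → (prefB.length : Int) = m + 1 →
    (∀ x : Int, 0 ≤ x → x < m → PySem.List.pyGetD dpB x 0 = cvsInit mi ma x) →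
    (∀ i : Int, 0 ≤ i → i ≤ m → PySem.List.pyGetD prefB i 0 = (dpB.take i.toNat).sum) →
    ∃ dpB' prefB',
      (PySem.List.pyRange m (min (mi + 2) n) 1).foldl (cvsBStep mi ma) (dpB, prefB) = (dpB', prefB') ∧
      (dpB'.length : Int) = min (mi + 2) n ∧
      (prefB'.length : Int) = min (mi + 2) n + 1 ∧
      (∀ x : Int, 0 ≤ x → x < min (mi + 2) n → PySem.List.pyGetD dpB' x 0 = cvsInit mi ma x) ∧
      (∀ i : Int, 0 ≤ i → i ≤ min (mi + 2) n → PySem.List.pyGetD prefB' i 0 = (dpB'.take i.toNat).sum) := by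
  intro t
  induction t with
  | zero =>
    intro m dpB prefB ht h0 hm hl1 hl2 hinit hpref
    have hm0 : m = min (mi + 2) n := by omega
    subst hm0
    exact ⟨dpB, prefB, by rw [PySem.List.pyRange_one_eq_nil (le_refl _), List.foldl_nil], hl1, hl2, hinit, hpref⟩
  | succ t ih =>
    intro m dpB prefB ht h0 hm hl1 hl2 hinit hpref
    rw [show PySem.List.pyRange m (min (mi + 2) n) 1 = m :: PySem.List.pyRange (m+1) (min (mi + 2) n) 1 from
      PySem.List.pyRange_one_cons (by omega), List.foldl_cons]
    rw [cvsBStep_lt mi ma (dpB, prefB) m (by omega)]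
    have hlast : PySem.List.pyGetD prefB (-1) 0 = dpB.sum := by
      rw [pyGetD_last_of_len prefB m hl2 h0, hpref m h0 (le_refl _),
        List.take_of_length_le (by omega)]
    rw [hlast]
    have hinit' : ∀ x : Int, 0 ≤ x → x < m + 1 →
        PySem.List.pyGetD (dpB ++ [cvsInit mi ma m]) x 0 = cvsInit mi ma x := by
      intro x hx0 hxm
      by_cases hx : x < m
      · rw [pyGetD_append_lt _ _ _ hx0 (by omega), hinit x hx0 hx]
      · have hxe : x = m := by omega
        subst hxe
        have h := pyGetD_append_last dpB (cvsInit mi ma x)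
        rw [hl1] at h
        exact h
    have hpref' : ∀ i : Int, 0 ≤ i → i ≤ m + 1 →
        PySem.List.pyGetD (prefB ++ [dpB.sum + cvsInit mi ma m]) i 0
          = ((dpB ++ [cvsInit mi ma m]).take i.toNat).sum := by
      intro i hi0 him
      by_cases hi : i ≤ m
      · rw [pyGetD_append_lt _ _ _ hi0 (by omega), hpref i hi0 hi,
          List.take_append_of_le_length (by omega)]
      · have hie : i = m + 1 := by omega
        subst hie
        have h := pyGetD_append_last prefB (dpB.sum + cvsInit mi ma m)
        rw [hl2] at h
        rw [h, List.take_of_length_le (by simp; omega), List.sum_append, List.sum_singleton]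
    exact ih (m+1) (dpB ++ [cvsInit mi ma m]) (prefB ++ [dpB.sum + cvsInit mi ma m]) (by omega) (by omega) (by omega)
      (by simp; omega) (by simp; omega) hinit' hpref'

-- the joint induction: from aligned states, A's outer loop and B's pass produce the same dp list
lemma cvs_main (n mi ma : Int) (hmin : 0 ≤ mi) :
    ∀ (t : Nat) (m : Int) (dpB prefB : List Int) (g : Int → Int),
    (n - m).toNat = t → 0 ≤ m → m ≤ n → min (mi + 2) n ≤ m →
    (dpB.length : Int) = m → (prefB.length : Int) = m + 1 →
    (∀ x : Int, 0 ≤ x → x < m → g x = PySem.List.pyGetD dpB x 0) →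
    (∀ x : Int, m ≤ x → x < n → g x = cvsInit mi ma x) →
    (∀ i : Int, 0 ≤ i → i ≤ m → PySem.List.pyGetD prefB i 0 = (dpB.take i.toNat).sum) →
    (PySem.List.pyRange m n 1).foldl (cvsOuterStep n mi ma) ((PySem.List.pyRange 0 n 1).map g)
      = ((PySem.List.pyRange m n 1).foldl (cvsBStep mi ma) (dpB, prefB)).1 := by
  intro t
  induction t with
  | zero =>
    intro m dpB prefB g ht h0 hmn hm0 hl1 hl2 hg1 hg2 hpref
    rw [show PySem.List.pyRange m n 1 = [] from PySem.List.pyRange_one_eq_nil (by omega), List.foldl_nil, List.foldl_nil]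
    apply List.ext_getElem
    · simp only [List.length_map, PySem.List.length_pyRange_one]; omega
    · intro k h1 h2
      rw [List.getElem_map, PySem.List.getElem_pyRange_one]
      simp only [List.length_map, PySem.List.length_pyRange_one] at h1
      rw [hg1 (0 + (k : Int)) (by omega) (by omega),
        PySem.List.pyGetD_of_nonneg _ _ (by omega), List.getD_eq_getElem _ _ (by omega)]
      congr 1
      omega
  | succ t ih =>
    intro m dpB prefB g ht h0 hmn hm0 hl1 hl2 hg1 hg2 hpref
    have hmlt : m < n := by omega
    have hmi2 : mi + 2 ≤ m := by omega
    rw [show PySem.List.pyRange m n 1 = m :: PySem.List.pyRange (m+1) n 1 from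
      PySem.List.pyRange_one_cons (by omega), List.foldl_cons, List.foldl_cons]
    have hlast : PySem.List.pyGetD prefB (-1) 0 = dpB.sum := by
      rw [pyGetD_last_of_len prefB m hl2 h0, hpref m h0 (le_refl _),
        List.take_of_length_le (by omega)]
    set lo : Int := max (m - ma - 1) (mi + 1) with hlo
    set hi : Int := m - mi with hhi
    set S : Int := ((PySem.List.pyRange lo hi 1).map g).sum with hS
    have hA : cvsOuterStep n mi ma ((PySem.List.pyRange 0 n 1).map g) m
        = (PySem.List.pyRange 0 n 1).map (fun x => if x = m then g m + S else g x) := by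
      unfold cvsOuterStep
      rw [show m - (mi + 1) + 1 = hi from by omega,
          show max (m - (ma + 1)) (mi + 1) = lo from by omega]
      exact inner_loop_rep n m h0 hmlt (hi - lo).toNat lo hi g rfl (by omega) (by omega)
    set vB : Int := if lo < hi then
        cvsInit mi ma m + (PySem.List.pyGetD prefB hi 0 - PySem.List.pyGetD prefB lo 0)
      else cvsInit mi ma m with hvB
    have hBstep : cvsBStep mi ma (dpB, prefB) m = (dpB ++ [vB], prefB ++ [dpB.sum + vB]) := by
      rw [cvsBStep_ge mi ma (dpB, prefB) m hmi2, hlast]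
    have hv : vB = g m + S := by
      rw [hg2 m (le_refl _) hmlt]
      by_cases hlh : lo < hi
      · rw [hvB, if_pos hlh, hS]
        have hmap : (PySem.List.pyRange lo hi 1).map g
            = (PySem.List.pyRange lo hi 1).map (fun j => PySem.List.pyGetD dpB j 0) := by
          apply List.map_congr_left
          intro j hj
          rw [PySem.List.mem_pyRange_one] at hj
          exact hg1 j (by omega) (by omega)
        rw [hmap, sum_range_getD dpB (hi - lo).toNat lo hi rfl (by omega) (by omega) (by omega)]
        rw [hpref hi (by omega) (by omega), hpref lo (by omega) (by omega)]
      · rw [hvB, if_neg hlh, hS,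
          show PySem.List.pyRange lo hi 1 = [] from PySem.List.pyRange_one_eq_nil (by omega)]
        simp
    rw [hA, hBstep]
    have hinit' : ∀ x : Int, 0 ≤ x → x < m + 1 →
        (fun x => if x = m then g m + S else g x) x = PySem.List.pyGetD (dpB ++ [vB]) x 0 := by
      intro x hx0 hxm
      by_cases hx : x < m
      · simp only [if_neg (by omega : ¬ x = m)]
        rw [pyGetD_append_lt _ _ _ hx0 (by omega), hg1 x hx0 hx]
      · have hxe : x = m := by omega
        subst hxe
        have h := pyGetD_append_last dpB vB
        rw [hl1] at h
        rw [h, hv]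
        simp
    have hg2' : ∀ x : Int, m + 1 ≤ x → x < n →
        (fun x => if x = m then g m + S else g x) x = cvsInit mi ma x := by
      intro x hx1 hx2
      simp only [if_neg (by omega : ¬ x = m)]
      exact hg2 x (by omega) hx2
    have hpref' : ∀ i : Int, 0 ≤ i → i ≤ m + 1 →
        PySem.List.pyGetD (prefB ++ [dpB.sum + vB]) i 0 = ((dpB ++ [vB]).take i.toNat).sum := by
      intro i hi0 him
      by_cases hile : i ≤ m
      · rw [pyGetD_append_lt _ _ _ hi0 (by omega), hpref i hi0 hile,
          List.take_append_of_le_length (by omega)]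
      · have hie : i = m + 1 := by omega
        subst hie
        have h := pyGetD_append_last prefB (dpB.sum + vB)
        rw [hl2] at h
        rw [h, List.take_of_length_le (by simp; omega), List.sum_append, List.sum_singleton]
    exact ih (m+1) (dpB ++ [vB]) (prefB ++ [dpB.sum + vB]) _ (by omega) (by omega) (by omega) (by omega)
      (by simp; omega) (by simp; omega) hinit' hg2' hpref'


-- ===== VERDICT (by name: the statement is the Claim_ definition above) =====
theorem count_valid_solutions_spec : Claim_equal_count_valid_solutions := by
  intro n mi ma ls le _ hpre
  obtain ⟨hmin, himp⟩ := hpre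
  unfold Spec_count_valid_solutions count_valid_solutions count_valid_solutions_alt
  by_cases hn : n ≤ 0
  · have hma : ma < mi := by
      by_cases h : mi ≤ ma
      · exfalso; have := himp h; omega
      · omega
    rw [show PySem.List.pyRange (mi+1) (ma+2) 1 = [] from PySem.List.pyRange_one_eq_nil (by omega),
        List.foldl_nil,
        show PySem.List.pyRange (mi+1+1) n 1 = [] from PySem.List.pyRange_one_eq_nil (by omega),
        List.foldl_nil,
        show PySem.List.pyRange 0 n 1 = [] from PySem.List.pyRange_one_eq_nil (by omega),
        List.foldl_nil,
        show List.replicate n.toNat (0 : Int) = [] from by rw [show n.toNat = 0 from by omega]; rfl]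
  · have hrep : List.replicate n.toNat (0 : Int) = (PySem.List.pyRange 0 n 1).map (fun _ => (0 : Int)) := by
      apply List.ext_getElem
      · simp only [List.length_replicate, List.length_map, PySem.List.length_pyRange_one]; omega
      · intro k h1 h2; simp
    have hdp1 : (PySem.List.pyRange (mi+1) (ma+2) 1).foldl (fun dp k => PySem.List.pySetD dp k 1)
          ((PySem.List.pyRange 0 n 1).map (fun _ => (0 : Int)))
        = (PySem.List.pyRange 0 n 1).map (cvsInit mi ma) := by
      by_cases hc : mi ≤ ma
      · rw [set_loop_rep n (ma+2-(mi+1)).toNat (mi+1) (ma+2) _ rfl (by omega) (by omega)]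
        apply List.map_congr_left
        intro x _
        simp only [cvsInit]
        split_ifs <;> first | rfl | omega
      · rw [show PySem.List.pyRange (mi+1) (ma+2) 1 = [] from PySem.List.pyRange_one_eq_nil (by omega),
          List.foldl_nil]
        apply List.map_congr_left
        intro x _
        simp only [cvsInit]
        rw [if_neg (by omega)]
    set m0 : Int := min (mi + 2) n with hm0
    have hp0 : ∀ i : Int, 0 ≤ i → i ≤ 0 →
        PySem.List.pyGetD [(0:Int)] i 0 = (List.take i.toNat ([] : List Int)).sum := by
      intro i h1 h2
      have hi0 : i = 0 := by omega
      rw [hi0]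
      decide
    obtain ⟨dpB', prefB', heq, hL1, hL2, hInit, hPref⟩ :=
      cvs_base n mi ma (m0 - 0).toNat 0 [] [0] (by omega) le_rfl (by omega) (by simp) (by simp)
        (by intro x h1 h2; omega) hp0
    have hr : PySem.List.pyRange (mi+1+1) n 1 = PySem.List.pyRange m0 n 1 := by
      by_cases h : mi + 2 ≤ n
      · rw [show m0 = mi + 2 from by omega, show mi+1+1 = mi+2 from by ring]
      · rw [PySem.List.pyRange_one_eq_nil (by omega), PySem.List.pyRange_one_eq_nil (by omega)]
    have hsplit : PySem.List.pyRange 0 n 1 = PySem.List.pyRange 0 m0 1 ++ PySem.List.pyRange m0 n 1 :=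
      PySem.List.pyRange_one_append 0 m0 n (by omega) (by omega)
    conv_rhs => rw [hsplit]
    rw [hrep, hdp1, hr, List.foldl_append, heq]
    have hmain := cvs_main n mi ma hmin (n - m0).toNat m0 dpB' prefB' (cvsInit mi ma) rfl
      (by omega) (by omega) (by omega) hL1 hL2
      (fun x hx1 hx2 => (hInit x hx1 hx2).symm)
      (fun x _ _ => rfl) hPref
    rw [hmain]
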